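-- pv_equiv track=rewrite | github.com/BGSU-RNA/RNA-3D-Hub-core | pymotifs/motif_atlas/compare_and_cluster.py | get_nt_positions
-- ===== SOURCE A (Python) =====
-- def get_nt_positions(loop):
--     """
--     takes in a list of strings representing nucleotides
--     returns a list of lists of nucleotide position numbers (by strand)
--     tiny ex: positions = [[nt1, nt2, nt3], [nt4, nt5, nt6]]
--     ^ nts 1-3 are on one strand and nt4-6 are on another
--     also, nts here look like: "5J7L|1|AA|C|569"
--     """
--
--     positions = []
--     count = 0
--     for index, strand in enumerate(loop['strand']):
--         tempList = []
--         for element in strand: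
--             tempList.append(count)
--             count += 1
--         positions.append(tempList)
--
--     return(positions)
-- ===== SOURCE B (Python) =====
-- def get_nt_positions(loop):
--     """Staged approach: materialize the global numbering 0..total-1 once,
--     then recursively carve it into per-strand chunks by strand length."""
--     strands = loop['strand']
--     def split(strands, flat):
--         if not strands:
--             return []
--         n = len(strands[0])
--         return [flat[:n]] + split(strands[1:], flat[n:])
--     return split(strands, list(range(sum(map(len, strands)))))
-- ===== Notes on version B (the rewrite author's own statement) =====
-- stated objective: alternative
-- what changed: Instead of a single pass with a mutable running counter appended element by element, B first materializes the whole global numbering list(range(total)) and then recursively partitions it into per-strand chunks by slicing off len(strand) items at a time.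
import Mathlib
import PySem

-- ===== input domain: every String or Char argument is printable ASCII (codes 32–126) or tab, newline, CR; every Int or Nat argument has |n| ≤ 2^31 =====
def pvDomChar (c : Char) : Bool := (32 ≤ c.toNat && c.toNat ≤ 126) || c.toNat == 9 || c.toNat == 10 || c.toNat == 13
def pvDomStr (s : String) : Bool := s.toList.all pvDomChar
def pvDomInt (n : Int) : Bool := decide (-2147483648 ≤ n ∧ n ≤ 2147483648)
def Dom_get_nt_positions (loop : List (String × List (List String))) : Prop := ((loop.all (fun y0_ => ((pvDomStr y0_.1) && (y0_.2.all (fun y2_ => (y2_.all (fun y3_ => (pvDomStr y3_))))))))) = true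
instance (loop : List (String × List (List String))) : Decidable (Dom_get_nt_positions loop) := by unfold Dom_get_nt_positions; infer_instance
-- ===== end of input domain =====

-- B materializes the full global numbering once and recursively partitions it by strand lengths,
-- instead of A's single pass with a mutable counter appended element by element (objective: alternative).
-- Pre_ excludes inputs whose dict lacks a "strand" key, on which A raises KeyError.
-- ===== PORT A =====
def get_nt_positions (loop : List (String × List (List String))) : List (List Int) :=
  match loop.lookup "strand" with
  | none => []  -- unreachable under Pre_: Python raises KeyError here
  | some strands =>
    (strands.foldl
      (fun (st : List (List Int) × Int) strand =>
        let inner := strand.foldl (fun (t : List Int × Int) _ => (t.1 ++ [t.2], t.2 + 1)) ([], st.2)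
        (st.1 ++ [inner.1], inner.2))
      ([], 0)).1

-- ===== PORT B =====
-- flat[:n] / flat[n:] with 0 ≤ n are exactly List.take / List.drop.
def pvSplit : List (List String) → List Int → List (List Int)
  | [], _ => []
  | s :: ss, flat => flat.take s.length :: pvSplit ss (flat.drop s.length)

def get_nt_positions_alt (loop : List (String × List (List String))) : List (List Int) :=
  match loop.lookup "strand" with
  | none => []  -- unreachable under Pre_
  | some strands =>
    let total : Int := (strands.map (fun s => (s.length : Int))).sum
    pvSplit strands (PySem.List.pyRange 0 total 1)

-- ===== PRECONDITION & SPEC =====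
-- Exactly the inputs on which A returns: a "strand" key must be present (else Python raises KeyError).
def Pre_get_nt_positions (loop : List (String × List (List String))) : Prop :=
  (loop.lookup "strand").isSome
instance (loop : List (String × List (List String))) : Decidable (Pre_get_nt_positions loop) := by unfold Pre_get_nt_positions; infer_instance
def pvWitness_get_nt_positions : (List (String × List (List String))) := [("strand", [["a", "b"], ["c"]])]
def Spec_get_nt_positions (loop : List (String × List (List String))) (out : List (List Int)) : Prop := out = get_nt_positions_alt loop
instance (loop : List (String × List (List String))) (out : List (List Int)) : Decidable (Spec_get_nt_positions loop out) := by unfold Spec_get_nt_positions; infer_instance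

-- ===== CLAIM =====
def Claim_equal_get_nt_positions : Prop := ∀ (loop : List (String × List (List String))), Dom_get_nt_positions loop → Pre_get_nt_positions loop → Spec_get_nt_positions loop (get_nt_positions loop)

-- ===== LEMMAS AND PROOFS =====
-- per-strand range lists starting at offset c (characterizes both sides)
def pvRanges : Int → List (List String) → List (List Int)
  | _, [] => []
  | c, s :: ss => PySem.List.pyRange c (c + s.length) 1 :: pvRanges (c + s.length) ss

-- A's inner loop over one strand produces the integer range [c, c + strand.length).
lemma inner_eq_range (strand : List String) (acc : List Int) (c : Int) :
    strand.foldl (fun (t : List Int × Int) _ => (t.1 ++ [t.2], t.2 + 1)) (acc, c)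
      = (acc ++ PySem.List.pyRange c (c + strand.length) 1, c + strand.length) := by
  induction strand generalizing acc c with
  | nil => simp
  | cons x xs ih =>
    simp only [List.foldl_cons, ih, List.length_cons]
    have h : (c : Int) < c + ((xs.length : Int) + 1) := by omega
    have e : c + 1 + (xs.length : Int) = c + ((xs.length : Int) + 1) := by ring
    push_cast
    rw [e, PySem.List.pyRange_one_cons h]
    simp

-- A's outer fold from any state equals the accumulated per-strand ranges.
lemma b_fold_eq (strands : List (List String)) (acc : List (List Int)) (c : Int) :
    (strands.foldl
      (fun (st : List (List Int) × Int) strand =>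
        (st.1 ++ [PySem.List.pyRange st.2 (st.2 + strand.length) 1], st.2 + strand.length))
      (acc, c)).1
      = acc ++ pvRanges c strands := by
  induction strands generalizing acc c with
  | nil => simp [pvRanges]
  | cons s ss ih =>
    simp only [List.foldl_cons]
    rw [ih]
    simp [pvRanges]

lemma a_fold_eq (strands : List (List String)) (acc : List (List Int)) (c : Int) :
    (strands.foldl
      (fun (st : List (List Int) × Int) strand =>
        let inner := strand.foldl (fun (t : List Int × Int) _ => (t.1 ++ [t.2], t.2 + 1)) ([], st.2)
        (st.1 ++ [inner.1], inner.2)) (acc, c)).1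
      = acc ++ pvRanges c strands := by
  simp only [inner_eq_range, List.nil_append]
  exact b_fold_eq strands acc c

-- B's splitter applied to the contiguous range produces the same per-strand ranges.
lemma split_range_eq (strands : List (List String)) (c : Int) :
    pvSplit strands (PySem.List.pyRange c (c + (strands.map (fun s => (s.length : Int))).sum) 1)
      = pvRanges c strands := by
  induction strands generalizing c with
  | nil => simp [pvSplit, pvRanges]
  | cons s ss ih =>
    simp only [pvSplit, pvRanges, List.map_cons, List.sum_cons]
    have hrest : (0 : Int) ≤ (ss.map (fun s => (s.length : Int))).sum := by
      apply List.sum_nonneg; intro x hx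
      obtain ⟨y, _, rfl⟩ := List.mem_map.mp hx
      positivity
    have h1 : c ≤ c + (s.length : Int) := by omega
    have h2 : c + (s.length : Int) ≤ c + ((s.length : Int) + (ss.map (fun s => (s.length : Int))).sum) := by omega
    rw [show c + ((s.length : Int) + (ss.map (fun s => (s.length : Int))).sum)
          = c + (s.length : Int) + (ss.map (fun s => (s.length : Int))).sum by ring] at h2 ⊢
    rw [PySem.List.pyRange_one_append c (c + (s.length : Int)) _ h1 h2]
    have hlen : (PySem.List.pyRange c (c + (s.length : Int)) 1).length = s.length := by
      rw [PySem.List.length_pyRange_one]; omega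
    rw [List.take_left' hlen, List.drop_left' hlen, ih]

-- ===== VERDICT =====
theorem get_nt_positions_spec : Claim_equal_get_nt_positions := by
  intro loop _ _
  unfold Spec_get_nt_positions get_nt_positions get_nt_positions_alt
  cases loop.lookup "strand" with
  | none => rfl
  | some strands =>
    show _ = _
    simp only []
    rw [a_fold_eq strands [] 0, List.nil_append]
    have := split_range_eq strands 0
    rw [show (0:Int) + (strands.map (fun s => (s.length : Int))).sum = (strands.map (fun s => (s.length : Int))).sum by ring] at this
    exact this.symm
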